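-- pv_equiv track=rewrite | github.com/Abjad/abjad | tags/release-1.1.1/abjad/tools/listtools/negate_elements_at_indices.py | negate_elements_at_indices
-- ===== SOURCE A (Python) =====
-- def negate_elements_at_indices(l, indices, period = None):
--    '''Negate elements in ``l`` at ``indices``.
--    When ``period`` is a positive integer, read ``indices``
--    cyclically according to ``period``.
--
--    ::
--
--       abjad> l = [1, 2, 3, 4, 5, -6, -7, -8, -9, -10]
--       abjad> listtools.negate_elements_at_indices(l, [0, 1, 2], period = None)
--       [-1, -2, -3, 4, 5, -6, -7, -8, -9, -10]
--
--    ::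
--
--       abjad> l = [1, 2, 3, 4, 5, -6, -7, -8, -9, -10]
--       abjad> listtools.negate_elements_at_indices(l, [0, 1, 2], period = 5)
--       [-1, -2, -3, 4, 5, 6, 7, -8, -9, -10]
--
--    Raise :exc:`TypeError` when *l* is not a list::
--
--       abjad> listtools.negate_elements_at_indices('foo', [0, 1, 2])
--       TypeError
--    '''
--
--    if not isinstance(l, list):
--       raise TypeError
--
--    result = [ ]
--
--    for i, element in enumerate(l):
--       if (i in indices) or (period and i % period in indices):
--          result.append(-element)
--       else:
--          result.append(element)
--
--    return result
-- ===== SOURCE B (Python) =====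
-- def negate_elements_at_indices(l, indices, period=None):
--     if not isinstance(l, list):
--         raise TypeError
--     n = len(l)
--     positions = {i for i in indices if 0 <= i < n}
--     if period:
--         for r in set(indices):
--             if 0 <= r < period:
--                 positions.update(range(r, n, period))
--     result = list(l)
--     for i in positions:
--         result[i] = -result[i]
--     return result
-- ===== Notes on version B (the rewrite author's own statement) =====
-- stated objective: faster
-- what changed: Instead of testing every position i against the whole indices list (plus a mod-and-scan per element), B precomputes the set of positions to negate once: direct in-range hits plus, for a truthy period, range() strides from each residue in [0, period), then negates exactly those positions in a copy of the list.
-- intended difference: For a negative period (the docstring requires a positive one), A also negates positions i whose Python negative-modulus residue i % period happens to occur in indices, while B applies the cyclic rule only to residues valid for a positive period and leaves those elements untouched, which is the documented intent. — e.g. on negate_elements_at_indices([7, 8], [-1], some (-2)): A returns [7, -8], B returns [7, 8]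
import Mathlib
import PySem

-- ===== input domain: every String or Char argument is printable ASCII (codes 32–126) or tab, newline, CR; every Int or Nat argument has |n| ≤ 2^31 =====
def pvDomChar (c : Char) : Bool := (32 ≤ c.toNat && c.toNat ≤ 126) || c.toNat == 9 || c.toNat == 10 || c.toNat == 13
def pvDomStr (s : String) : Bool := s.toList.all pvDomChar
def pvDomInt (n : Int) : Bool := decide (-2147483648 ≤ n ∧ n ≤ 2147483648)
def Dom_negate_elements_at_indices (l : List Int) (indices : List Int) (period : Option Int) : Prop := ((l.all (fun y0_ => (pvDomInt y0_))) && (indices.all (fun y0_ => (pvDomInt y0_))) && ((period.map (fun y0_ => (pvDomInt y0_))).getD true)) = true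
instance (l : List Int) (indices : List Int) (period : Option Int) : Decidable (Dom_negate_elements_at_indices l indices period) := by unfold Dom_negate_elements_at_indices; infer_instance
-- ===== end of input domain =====

-- B precomputes the set of positions to negate (direct in-range hits plus, for a truthy period,
-- range() strides from each residue in [0, period)) instead of scanning the indices list per element;
-- objective: faster. For negative period (the docstring requires a positive one) B differs from A
-- as stated at D_ below. The 'isinstance(l, list)' TypeError guard of A is outside the Lean type.

-- ===== PORT A =====
-- the loop's test '(i in indices) or (period and i % period in indices)'
def pyCondA (indices : List Int) (period : Option Int) (i : Int) : Bool :=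
  indices.contains i ||
    (match period with
     | none => false
     | some p => decide (p ≠ 0) && indices.contains (PySem.Int.mod i p))

def negate_elements_at_indices (l : List Int) (indices : List Int) (period : Option Int) : List Int :=
  (PySem.List.enumerate l).foldl
    (fun result ie =>
      if pyCondA indices period ie.1 then result ++ [-ie.2] else result ++ [ie.2]) []

-- ===== PORT B =====
def negate_elements_at_indices_alt (l : List Int) (indices : List Int) (period : Option Int) : List Int :=
  let n : Int := l.length
  -- positions = {i for i in indices if 0 <= i < n}
  let positions : PySem.Set Int :=
    indices.foldl (fun acc i => if 0 ≤ i ∧ i < n then PySem.Set.add acc i else acc)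
      PySem.Set.empty
  -- if period: for r in set(indices): if 0 <= r < period: positions.update(range(r, n, period))
  let positions : PySem.Set Int :=
    match period with
    | none => positions
    | some p =>
      if p = 0 then positions
      else
        (PySem.Set.ofList indices).foldl
          (fun acc r =>
            if 0 ≤ r ∧ r < p then (PySem.List.pyRange r n p).foldl PySem.Set.add acc else acc)
          positions
  -- result = list(l); for i in positions: result[i] = -result[i]
  positions.foldl (fun res i => PySem.List.pySetD res i (-(PySem.List.pyGetD res i 0))) l

-- ===== PRECONDITION & SPEC =====
-- For a negative period, A also negates each position i (not itself in indices) whose Python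
-- negative-modulus residue i % period occurs in indices (giving -l[i] there), while B applies the
-- cyclic rule only to residues valid for a positive period and returns l[i] unchanged there;
-- the docstring specifies a positive period, so B's value is the intended one.
def D_negate_elements_at_indices (l : List Int) (indices : List Int) (period : Option Int) : Prop :=
  period.getD 0 < 0 ∧ ∃ i ∈ List.range l.length,
    (i : Int) ∉ indices ∧ PySem.Int.mod (i : Int) (period.getD 0) ∈ indices ∧ l.getD i 0 ≠ 0
instance (l : List Int) (indices : List Int) (period : Option Int) : Decidable (D_negate_elements_at_indices l indices period) := by unfold D_negate_elements_at_indices; infer_instance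

def Spec_negate_elements_at_indices (l : List Int) (indices : List Int) (period : Option Int) (out : List Int) : Prop := ¬ D_negate_elements_at_indices l indices period → out = negate_elements_at_indices_alt l indices period
instance (l : List Int) (indices : List Int) (period : Option Int) (out : List Int) : Decidable (Spec_negate_elements_at_indices l indices period out) := by unfold Spec_negate_elements_at_indices; infer_instance

def pvDiffWitness_negate_elements_at_indices : List Int × List Int × Option Int :=
  ([7, 8], [-1], some (-2))
def pvDiffWitnessOut_negate_elements_at_indices : (List Int) × (List Int) :=
  ([7, -8], [7, 8])

-- ===== CLAIM (what is proved, stated in full; the proofs are below) =====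
def Claim_unchanged_negate_elements_at_indices : Prop := ∀ (l : List Int) (indices : List Int) (period : Option Int), Dom_negate_elements_at_indices l indices period → Spec_negate_elements_at_indices l indices period (negate_elements_at_indices l indices period)
def Claim_changed_negate_elements_at_indices : Prop := Dom_negate_elements_at_indices (pvDiffWitness_negate_elements_at_indices.1) (pvDiffWitness_negate_elements_at_indices.2.1) (pvDiffWitness_negate_elements_at_indices.2.2) ∧ D_negate_elements_at_indices (pvDiffWitness_negate_elements_at_indices.1) (pvDiffWitness_negate_elements_at_indices.2.1) (pvDiffWitness_negate_elements_at_indices.2.2) ∧ negate_elements_at_indices (pvDiffWitness_negate_elements_at_indices.1) (pvDiffWitness_negate_elements_at_indices.2.1) (pvDiffWitness_negate_elements_at_indices.2.2) = pvDiffWitnessOut_negate_elements_at_indices.1 ∧ negate_elements_at_indices_alt (pvDiffWitness_negate_elements_at_indices.1) (pvDiffWitness_negate_elements_at_indices.2.1) (pvDiffWitness_negate_elements_at_indices.2.2) = pvDiffWitnessOut_negate_elements_at_indices.2 ∧ pvDiffWitnessOut_negate_elements_at_indices.1 ≠ pvDiffWitnessOut_negate_elements_at_indices.2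
def Claim_exact_negate_elements_at_indices : Prop := ∀ (l : List Int) (indices : List Int) (period : Option Int), Dom_negate_elements_at_indices l indices period → D_negate_elements_at_indices l indices period → negate_elements_at_indices l indices period ≠ negate_elements_at_indices_alt l indices period

-- ===== LEMMAS AND PROOFS =====
lemma A_eq_map (l indices : List Int) (period : Option Int) :
    negate_elements_at_indices l indices period =
      (PySem.List.enumerate l).map
        (fun ie => if pyCondA indices period ie.1 then -ie.2 else ie.2) := by
  unfold negate_elements_at_indices
  have h : (fun (result : List Int) (ie : Int × Int) =>
      if pyCondA indices period ie.1 then result ++ [-ie.2] else result ++ [ie.2]) =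
      fun result ie => result ++ [if pyCondA indices period ie.1 then -ie.2 else ie.2] := by
    funext r ie; split <;> rfl
  rw [h, PySem.List.foldl_append_singleton_eq_map, List.nil_append]

lemma mem_foldl_step {α : Type} (lst : List α) (init : List Int)
    (step : List Int → α → List Int) (Q : α → Int → Prop) (y : Int)
    (h : ∀ acc x, x ∈ lst → (y ∈ step acc x ↔ y ∈ acc ∨ Q x y)) :
    y ∈ lst.foldl step init ↔ y ∈ init ∨ ∃ x ∈ lst, Q x y := by
  induction lst generalizing init with
  | nil => simp
  | cons a t ih =>
    simp only [List.foldl_cons]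
    rw [ih _ (fun acc x hx => h acc x (List.mem_cons_of_mem a hx)),
        h init a (List.mem_cons_self)]
    simp only [List.mem_cons]
    constructor
    · rintro ((hy | hq) | ⟨x, hx, hq⟩)
      · exact Or.inl hy
      · exact Or.inr ⟨a, Or.inl rfl, hq⟩
      · exact Or.inr ⟨x, Or.inr hx, hq⟩
    · rintro (hy | ⟨x, (rfl | hx), hq⟩)
      · exact Or.inl (Or.inl hy)
      · exact Or.inl (Or.inr hq)
      · exact Or.inr ⟨x, hx, hq⟩

lemma nodup_foldl_step {α : Type} (lst : List α) (init : List Int)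
    (step : List Int → α → List Int)
    (h : ∀ acc x, acc.Nodup → (step acc x).Nodup) (h0 : init.Nodup) :
    (lst.foldl step init).Nodup := by
  induction lst generalizing init with
  | nil => exact h0
  | cons a t ih => exact ih _ (h init a h0)

lemma mem_foldl_setAdd (xs : List Int) (acc : PySem.Set Int) (y : Int) :
    y ∈ xs.foldl PySem.Set.add acc ↔ y ∈ acc ∨ y ∈ xs := by
  induction xs generalizing acc with
  | nil => simp
  | cons a t ih =>
    simp only [List.foldl_cons, ih, PySem.Set.mem_add, List.mem_cons]
    tauto

lemma nodup_foldl_setAdd (xs : List Int) (acc : PySem.Set Int) (h : acc.Nodup) :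
    (xs.foldl PySem.Set.add acc).Nodup := by
  induction xs generalizing acc with
  | nil => exact h
  | cons a t ih => exact ih _ (PySem.Set.nodup_add acc a h)

lemma mod_eq_of_dvd_window (p r a : Int) (hp : p ≠ 0) (hd : p ∣ a - r)
    (hw : (0 < p → 0 ≤ r ∧ r < p) ∧ (p < 0 → p < r ∧ r ≤ 0)) :
    PySem.Int.mod a p = r := by
  have key := PySem.Int.floordiv_mul_add_mod a p
  obtain ⟨c, hc⟩ := hd
  have hdd : p ∣ PySem.Int.mod a p - r := ⟨c - PySem.Int.floordiv a p, by linarith [hc, key, mul_sub p c (PySem.Int.floordiv a p)]⟩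
  obtain ⟨d, hdv⟩ := hdd
  rcases lt_or_gt_of_ne hp with hneg | hpos
  · have hb1 := PySem.Int.mod_neg_bounds a hneg
    have hb2 := hw.2 hneg
    have hd0 : d = 0 := by
      rcases lt_trichotomy d 0 with h | h | h
      · nlinarith
      · exact h
      · nlinarith
    rw [hd0, mul_zero] at hdv
    omega
  · have hb1 := PySem.Int.mod_nonneg a hpos
    have hb2 := PySem.Int.mod_lt a hpos
    have hb3 := hw.1 hpos
    have hd0 : d = 0 := by
      rcases lt_trichotomy d 0 with h | h | h
      · nlinarith
      · exact h
      · nlinarith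
    rw [hd0, mul_zero] at hdv
    omega

lemma negFold_spec (ps : List Int) (xs : List Int)
    (hmem : ∀ i ∈ ps, 0 ≤ i ∧ i < (xs.length : Int)) (hnd : ps.Nodup) :
    ∀ j : Nat,
      (ps.foldl (fun res i => PySem.List.pySetD res i (-(PySem.List.pyGetD res i 0))) xs)[j]? =
        (xs[j]?).map (fun v => if (j : Int) ∈ ps then -v else v) := by
  induction ps generalizing xs with
  | nil => intro j; simp
  | cons a t ih =>
    intro j
    obtain ⟨ha0, han⟩ := hmem a List.mem_cons_self
    have hstep : PySem.List.pySetD xs a (-(PySem.List.pyGetD xs a 0)) =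
        xs.set a.toNat (-(xs[a.toNat]'(by omega))) := by
      rw [PySem.List.pySetD_of_nonneg _ _ ha0]
      congr 1
      have ha : a = ((a.toNat : Nat) : Int) := by omega
      have h1 : PySem.List.pyGetD xs a 0 = xs.getD a.toNat 0 := by
        rw [ha]; exact PySem.List.pyGetD_natCast xs a.toNat 0
      rw [h1, List.getD_eq_getElem?_getD, List.getElem?_eq_getElem (by omega), Option.getD_some]
    simp only [List.foldl_cons, hstep]
    rw [ih _ (by intro i hi; have := hmem i (List.mem_cons_of_mem a hi); simpa using this)
        (List.Nodup.of_cons hnd)]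
    have hanot : a ∉ t := (List.nodup_cons.mp hnd).1
    by_cases hjlen : j < xs.length
    · rw [List.getElem?_set, List.getElem?_eq_getElem hjlen]
      by_cases hja : a.toNat = j
      · have hjint : ((j : Int)) = a := by omega
        have hnotin : (j : Int) ∉ t := by rw [hjint]; exact hanot
        simp [hja, hjlen, hjint]
        exact fun h => absurd h hanot
      · have hjint : ((j : Int)) ≠ a := by omega
        simp [hja, hjint]
    · have h1 : xs[j]? = none := List.getElem?_eq_none (by omega)
      have h2 : (xs.set a.toNat (-(xs[a.toNat]'(by omega))))[j]? = none :=
        List.getElem?_eq_none (by simpa using (by omega : xs.length ≤ j))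
      rw [h1, h2]
      simp

-- proof-side names for B's intermediate sets (definitionally what the lets in B build)
def directDef (l indices : List Int) : PySem.Set Int :=
  indices.foldl
    (fun acc i => if 0 ≤ i ∧ i < (l.length : Int) then PySem.Set.add acc i else acc)
    PySem.Set.empty

def toNegDef (l indices : List Int) (period : Option Int) : PySem.Set Int :=
  match period with
  | none => directDef l indices
  | some p =>
    if p = 0 then directDef l indices
    else
      (PySem.Set.ofList indices).foldl
        (fun acc r =>
          if 0 ≤ r ∧ r < p then
            (PySem.List.pyRange r (l.length : Int) p).foldl PySem.Set.add acc
          else acc)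
        (directDef l indices)

lemma B_eq (l indices : List Int) (period : Option Int) :
    negate_elements_at_indices_alt l indices period =
      (toNegDef l indices period).foldl
        (fun res i => PySem.List.pySetD res i (-(PySem.List.pyGetD res i 0))) l := rfl

lemma mem_directDef (l indices : List Int) (y : Int) :
    y ∈ directDef l indices ↔ y ∈ indices ∧ 0 ≤ y ∧ y < (l.length : Int) := by
  unfold directDef
  rw [mem_foldl_step indices PySem.Set.empty _
      (fun i y => i = y ∧ 0 ≤ i ∧ i < (l.length : Int)) y ?_]
  · constructor
    · rintro (h | ⟨x, hx, rfl, h1, h2⟩)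
      · simp [PySem.Set.empty] at h
      · exact ⟨hx, h1, h2⟩
    · rintro ⟨hx, h1, h2⟩
      exact Or.inr ⟨y, hx, rfl, h1, h2⟩
  · intro acc x _
    split
    · rename_i hb
      rw [PySem.Set.mem_add]
      constructor
      · rintro (h | rfl)
        · exact Or.inl h
        · exact Or.inr ⟨rfl, hb⟩
      · rintro (h | ⟨rfl, _⟩)
        · exact Or.inl h
        · exact Or.inr rfl
    · rename_i hb
      constructor
      · exact Or.inl
      · rintro (h | ⟨rfl, hc⟩)
        · exact h
        · exact absurd hc hb

-- the periodic fold: membership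
lemma mem_periodic_fold (l indices : List Int) (p : Int) (y : Int) :
    y ∈ (PySem.Set.ofList indices).foldl
        (fun acc r =>
          if 0 ≤ r ∧ r < p then
            (PySem.List.pyRange r (l.length : Int) p).foldl PySem.Set.add acc
          else acc)
        (directDef l indices) ↔
      y ∈ directDef l indices ∨
        ∃ r ∈ PySem.Set.ofList indices, (0 ≤ r ∧ r < p) ∧
          y ∈ PySem.List.pyRange r (l.length : Int) p := by
  apply mem_foldl_step
  intro acc x _
  split
  · rename_i hv
    rw [mem_foldl_setAdd]
    tauto
  · rename_i hv
    constructor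
    · exact Or.inl
    · rintro (h | ⟨hvv, _⟩)
      · exact h
      · exact absurd hvv hv

lemma bounds_toNeg (l indices : List Int) (period : Option Int) (y : Int)
    (hy : y ∈ toNegDef l indices period) : 0 ≤ y ∧ y < (l.length : Int) := by
  have hdir : y ∈ directDef l indices → 0 ≤ y ∧ y < (l.length : Int) := by
    rw [mem_directDef]; tauto
  cases period with
  | none => exact hdir hy
  | some p =>
    simp only [toNegDef] at hy
    by_cases hp : p = 0
    · rw [if_pos hp] at hy; exact hdir hy
    · rw [if_neg hp, mem_periodic_fold] at hy
      rcases hy with h | ⟨r, _, ⟨hr0, hrp⟩, hmem⟩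
      · exact hdir h
      · rw [PySem.List.mem_pyRange_iff_of_pos (by omega)] at hmem
        exact ⟨by omega, hmem.2.1⟩

lemma nodup_toNeg (l indices : List Int) (period : Option Int) :
    (toNegDef l indices period).Nodup := by
  have hdir : (directDef l indices).Nodup := by
    apply nodup_foldl_step
    · intro acc x h
      split
      · exact PySem.Set.nodup_add acc x h
      · exact h
    · exact List.nodup_nil
  cases period with
  | none => exact hdir
  | some p =>
    simp only [toNegDef]
    split
    · exact hdir
    · apply nodup_foldl_step
      · intro acc x h
        split
        · exact nodup_foldl_setAdd _ _ h
        · exact h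
      · exact hdir

-- for p > 0 the strides hit exactly the positions whose residue lies in indices
lemma mem_toNeg_iff_pos (l indices : List Int) (p : Int) (hp : 0 < p) (y : Int)
    (hy0 : 0 ≤ y) (hyn : y < (l.length : Int)) :
    y ∈ toNegDef l indices (some p) ↔
      y ∈ indices ∨ PySem.Int.mod y p ∈ indices := by
  simp only [toNegDef]
  rw [if_neg (by omega), mem_periodic_fold, mem_directDef]
  constructor
  · rintro (⟨h, _⟩ | ⟨r, hr, ⟨hr0, hrp⟩, hmem⟩)
    · exact Or.inl h
    · rw [PySem.List.mem_pyRange_iff_of_pos hp] at hmem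
      have : PySem.Int.mod y p = r :=
        mod_eq_of_dvd_window p r y (by omega) hmem.2.2 ⟨fun _ => ⟨hr0, hrp⟩, by omega⟩
      rw [this]
      exact Or.inr ((PySem.Set.mem_ofList _ _).mp hr)
  · rintro (h | h)
    · exact Or.inl ⟨h, hy0, hyn⟩
    · refine Or.inr ⟨PySem.Int.mod y p, (PySem.Set.mem_ofList _ _).mpr h,
        ⟨PySem.Int.mod_nonneg y hp, PySem.Int.mod_lt y hp⟩, ?_⟩
      rw [PySem.List.mem_pyRange_iff_of_pos hp]
      have key := PySem.Int.floordiv_mul_add_mod y p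
      have h1 := PySem.Int.mod_nonneg y hp
      have h2 := PySem.Int.mod_lt y hp
      have hf : 0 ≤ PySem.Int.floordiv y p := by nlinarith
      refine ⟨by nlinarith, hyn, ⟨PySem.Int.floordiv y p, by linarith⟩⟩

-- for p < 0 the stride loop never fires: only direct hits remain
lemma toNeg_nonpos (l indices : List Int) (p : Int) (hp : p < 0) :
    toNegDef l indices (some p) = directDef l indices := by
  simp only [toNegDef]
  rw [if_neg (by omega)]
  generalize PySem.Set.ofList indices = xs
  induction xs with
  | nil => rfl
  | cons a t ih =>
    simp only [List.foldl_cons]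
    rw [if_neg (by omega)]
    exact ih

lemma pyCondA_some (indices : List Int) (p i : Int) :
    pyCondA indices (some p) i =
      (indices.contains i || (decide (p ≠ 0) && indices.contains (PySem.Int.mod i p))) := rfl

lemma pyCondA_some_iff (indices : List Int) (p i : Int) (hp : p ≠ 0) :
    pyCondA indices (some p) i = true ↔ (i ∈ indices ∨ PySem.Int.mod i p ∈ indices) := by
  rw [pyCondA_some]
  simp [hp]

-- away from negative periods, membership in B's set is exactly A's per-element test
lemma mem_toNeg_iff (l indices : List Int) (period : Option Int)
    (hp : 0 ≤ period.getD 0) (y : Int) (hy0 : 0 ≤ y) (hyn : y < (l.length : Int)) :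
    y ∈ toNegDef l indices period ↔ pyCondA indices period y = true := by
  cases period with
  | none =>
    simp only [toNegDef, mem_directDef, pyCondA, Bool.or_false, List.contains_iff_mem]
    exact ⟨fun h => h.1, fun h => ⟨h, hy0, hyn⟩⟩
  | some p =>
    simp only [Option.getD_some] at hp
    rcases eq_or_lt_of_le hp with hp0 | hp0
    · subst hp0
      have htn : toNegDef l indices (some 0) = directDef l indices := by
        simp [toNegDef]
      rw [htn, mem_directDef, pyCondA_some]
      simp only [ne_eq, not_true_eq_false, decide_false, Bool.false_and, Bool.or_false,
        List.contains_iff_mem]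
      exact ⟨fun h => h.1, fun h => ⟨h, hy0, hyn⟩⟩
    · rw [mem_toNeg_iff_pos l indices p hp0 y hy0 hyn,
        pyCondA_some_iff indices p y (by omega)]

lemma getD_eq_getElem (l : List Int) (j : Nat) (hj : j < l.length) :
    l.getD j 0 = l[j] := by
  rw [List.getD_eq_getElem?_getD, List.getElem?_eq_getElem hj, Option.getD_some]

-- per-position values of both ports
lemma A_getElem? (l indices : List Int) (period : Option Int) (j : Nat) (hj : j < l.length) :
    (negate_elements_at_indices l indices period)[j]? =
      some (if pyCondA indices period (j : Int) then -l[j] else l[j]) := by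
  rw [A_eq_map, List.getElem?_map, PySem.List.getElem?_enumerate,
    List.getElem?_eq_getElem hj]
  simp

lemma B_getElem? (l indices : List Int) (period : Option Int) (j : Nat) (hj : j < l.length) :
    (negate_elements_at_indices_alt l indices period)[j]? =
      some (if (j : Int) ∈ toNegDef l indices period then -l[j] else l[j]) := by
  rw [B_eq]
  rw [negFold_spec _ _ (fun i hi => bounds_toNeg l indices period i hi)
      (nodup_toNeg l indices period) j]
  rw [List.getElem?_eq_getElem hj]
  simp

-- ===== VERDICT (by name: the statements are the Claim_ definitions above) =====
theorem negate_elements_at_indices_spec : Claim_unchanged_negate_elements_at_indices := by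
  unfold Claim_unchanged_negate_elements_at_indices
  intro l indices period _
  unfold Spec_negate_elements_at_indices
  intro hnd
  apply List.ext_getElem?
  intro j
  by_cases hj : j < l.length
  · rw [A_getElem? l indices period j hj, B_getElem? l indices period j hj]
    congr 1
    by_cases hp : 0 ≤ period.getD 0
    · have hiff := mem_toNeg_iff l indices period hp (j : Int) (by omega) (by exact_mod_cast hj)
      by_cases hc : pyCondA indices period (j : Int) = true
      · rw [if_pos hc, if_pos (hiff.mpr hc)]
      · rw [if_neg hc, if_neg (fun h => hc (hiff.mp h))]
    · -- negative period: strides never fire in B; ¬D_ kills A's residue-only hits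
      rw [not_le] at hp
      obtain ⟨p, rfl⟩ : ∃ p, period = some p := by
        cases period with
        | none => simp at hp
        | some p => exact ⟨p, rfl⟩
      simp only [Option.getD_some] at hp
      have htn := toNeg_nonpos l indices p hp
      by_cases hm : (j : Int) ∈ indices
      · have h1 : pyCondA indices (some p) (j : Int) = true :=
          (pyCondA_some_iff indices p _ (by omega)).mpr (Or.inl hm)
        have h2 : (j : Int) ∈ toNegDef l indices (some p) := by
          rw [htn, mem_directDef]
          exact ⟨hm, by omega, by exact_mod_cast hj⟩
        rw [if_pos h1, if_pos h2]
      · have h2 : (j : Int) ∉ toNegDef l indices (some p) := by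
          rw [htn, mem_directDef]
          exact fun h => hm h.1
        rw [if_neg h2]
        by_cases hres : PySem.Int.mod (j : Int) p ∈ indices
        · have h1 : pyCondA indices (some p) (j : Int) = true :=
            (pyCondA_some_iff indices p _ (by omega)).mpr (Or.inr hres)
          rw [if_pos h1]
          have hz : l.getD j 0 = 0 := by
            by_contra hz
            exact hnd ⟨by simp [hp], j, List.mem_range.mpr hj, hm, by simpa using hres, hz⟩
          rw [getD_eq_getElem l j hj] at hz
          rw [hz]; ring_nf
        · have h1 : pyCondA indices (some p) (j : Int) ≠ true := by
            intro h
            rw [pyCondA_some_iff indices p _ (by omega)] at h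
            rcases h with h | h
            · exact hm h
            · exact hres h
          rw [if_neg h1]
  · have h1 : (negate_elements_at_indices l indices period)[j]? = none := by
      rw [A_eq_map]
      apply List.getElem?_eq_none
      rw [List.length_map, PySem.List.length_enumerate]; omega
    have h2 : (negate_elements_at_indices_alt l indices period)[j]? = none := by
      rw [B_eq]
      rw [negFold_spec _ _ (fun i hi => bounds_toNeg l indices period i hi)
          (nodup_toNeg l indices period) j]
      rw [List.getElem?_eq_none (by omega)]
      rfl
    rw [h1, h2]

theorem negate_elements_at_indices_changed : Claim_changed_negate_elements_at_indices := by
  unfold Claim_changed_negate_elements_at_indices; decide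

theorem negate_elements_at_indices_tight : Claim_exact_negate_elements_at_indices := by
  unfold Claim_exact_negate_elements_at_indices
  intro l indices period _ hD heq
  obtain ⟨hp0, i, hi, hnot, hres, hz⟩ := hD
  cases period with
  | none => simp at hp0
  | some p =>
    simp only [Option.getD_some] at hp0 hres
    have hil := List.mem_range.mp hi
    have hA := A_getElem? l indices (some p) i hil
    have hB := B_getElem? l indices (some p) i hil
    rw [heq, hB] at hA
    have hcond : pyCondA indices (some p) (i : Int) = true :=
      (pyCondA_some_iff indices p _ (by omega)).mpr (Or.inr hres)
    have hmemB : (i : Int) ∉ toNegDef l indices (some p) := by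
      rw [toNeg_nonpos l indices p hp0, mem_directDef]
      exact fun h => hnot h.1
    rw [if_pos hcond, if_neg hmemB] at hA
    have hval : l[i] = -l[i] := by injection hA
    rw [getD_eq_getElem l i hil] at hz
    omega
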